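-- pv_equiv track=rewrite | github.com/nikhila29/10XAcademy | Python programs/lucky_num.py | findLuckyNumber
-- ===== SOURCE A (Python) =====
-- def findLuckyNumber(nums):
-- 	count=1
-- 	for i in range(1,len(nums)):
-- 		if nums[i]==nums[i-1]:
-- 			count+=1
-- 		else:
-- 			if count==nums[i-1]:
-- 				return nums[i-1]
-- 			count=1
-- 	if count==nums[-1]:
-- 		return nums[-1]
-- 	return -1
-- ===== SOURCE B (Python) =====
-- def findLuckyNumber(nums):
--     n = len(nums)
--     starts = [i for i in range(n) if i == 0 or nums[i] != nums[i - 1]]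
--     bounds = starts + [n]
--     for s, e in zip(bounds, bounds[1:]):
--         if e - s == nums[s]:
--             return nums[s]
--     return -1
-- ===== Notes on version B (the rewrite author's own statement) =====
-- stated objective: alternative
-- what changed: B is a staged algorithm on an explicit index data structure: it first materializes the list of run-start indices with a filtered range comprehension, appends the length as a sentinel bound, and then scans zipped adjacent boundary pairs (s,e) returning nums[s] when e-s == nums[s]; A instead is a single inline count-and-reset state machine with a trailing nums[-1] check.
import Mathlib
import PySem

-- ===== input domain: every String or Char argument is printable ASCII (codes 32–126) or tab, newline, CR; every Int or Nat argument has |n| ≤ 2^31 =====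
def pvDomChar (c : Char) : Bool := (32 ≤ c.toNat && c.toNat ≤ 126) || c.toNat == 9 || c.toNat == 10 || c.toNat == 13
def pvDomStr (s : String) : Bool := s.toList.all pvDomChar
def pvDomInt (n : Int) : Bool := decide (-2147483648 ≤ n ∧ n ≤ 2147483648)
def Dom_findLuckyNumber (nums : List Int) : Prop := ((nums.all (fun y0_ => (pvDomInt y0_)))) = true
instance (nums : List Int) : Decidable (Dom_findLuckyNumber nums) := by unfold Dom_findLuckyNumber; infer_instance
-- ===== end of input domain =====

-- B first materializes the list of run-start indices (a staged boundary-index pass), then scans adjacent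
-- boundary pairs for one whose width equals the value at its start; objective: alternative decomposition
-- (same O(n) cost). A raises IndexError on the empty list, which Pre_ excludes.


-- ===== PORT A =====
-- the 'for i in range(1,len(nums))' loop with early return, carrying count; after the loop, the nums[-1] check
def findLuckyAuxA (nums : List Int) (i : Nat) (count : Int) : Int :=
  if _h : i < nums.length then
    if nums.getD i 0 = nums.getD (i-1) 0 then
      findLuckyAuxA nums (i+1) (count+1)
    else if count = nums.getD (i-1) 0 then
      nums.getD (i-1) 0
    else
      findLuckyAuxA nums (i+1) 1
  else
    match PySem.List.pyGet? nums (-1) with   -- nums[-1]; none = IndexError, excluded by Pre_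
    | some last => if count = last then last else -1
    | none => -1
termination_by nums.length - i

def findLuckyNumber (nums : List Int) : Int := findLuckyAuxA nums 1 1

-- ===== PORT B =====
-- 'for s, e in zip(bounds, bounds[1:])' with early return
def scanBounds (nums : List Int) : List (Nat × Nat) → Int
  | [] => -1
  | (s, e) :: rest =>
      if ((e : Int) - (s : Int)) = nums.getD s 0 then nums.getD s 0
      else scanBounds nums rest

def findLuckyNumber_alt (nums : List Int) : Int :=
  let n := nums.length
  let starts := (List.range n).filter (fun i => i == 0 || !(nums.getD i 0 == nums.getD (i-1) 0))
  let bounds := starts ++ [n]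
  scanBounds nums (bounds.zip bounds.tail)

-- ===== PRECONDITION & SPEC =====
-- Pre_ excludes only the empty list, on which A raises IndexError at nums[-1].
def Pre_findLuckyNumber (nums : List Int) : Prop := nums ≠ []
instance (nums : List Int) : Decidable (Pre_findLuckyNumber nums) := by unfold Pre_findLuckyNumber; infer_instance
def pvWitness_findLuckyNumber : List Int := [2, 2, 3, 4]

def Spec_findLuckyNumber (nums : List Int) (out : Int) : Prop := out = findLuckyNumber_alt nums
instance (nums : List Int) (out : Int) : Decidable (Spec_findLuckyNumber nums out) := by unfold Spec_findLuckyNumber; infer_instance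

-- ===== CLAIM (what is proved, stated in full; the proofs are below) =====
def Claim_equal_findLuckyNumber : Prop := ∀ (nums : List Int), Dom_findLuckyNumber nums → Pre_findLuckyNumber nums → Spec_findLuckyNumber nums (findLuckyNumber nums)

-- ===== LEMMAS AND PROOFS =====

-- proof-side middle man: a run-by-run recursion both ports are related to
def countPrefix (v : Int) : List Int → Nat
  | [] => 0
  | x :: rest => if x = v then countPrefix v rest + 1 else 0

def runScan : List Int → Int
  | [] => -1
  | head :: rest =>
      let k : Nat := 1 + countPrefix head rest
      if (k : Int) = head then head
      else runScan (rest.drop (k - 1))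
termination_by l => l.length
decreasing_by
  simp only [List.length_cons, List.length_drop]
  omega

-- A's loop rewritten as structural recursion on the tail, carrying the previous element
def auxList (prev count : Int) : List Int → Int
  | [] => if count = prev then prev else -1
  | x :: rest =>
      if x = prev then auxList x (count+1) rest
      else if count = prev then prev
      else auxList x 1 rest

lemma auxList_eq_runScan : ∀ (l : List Int) (prev count : Int),
    auxList prev count l =
      if (count + (countPrefix prev l : Int)) = prev then prev
      else runScan (l.drop (countPrefix prev l)) := by
  intro l
  induction l with
  | nil => intro prev count; simp [auxList, countPrefix, runScan]
  | cons x rest ih =>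
      intro prev count
      by_cases hx : x = prev
      · subst hx
        have hcp : countPrefix x (x :: rest) = countPrefix x rest + 1 := by
          simp [countPrefix]
        have hA : auxList x count (x :: rest) = auxList x (count + 1) rest := by
          simp [auxList]
        rw [hA, ih, hcp]
        have hdrop : (x :: rest).drop (countPrefix x rest + 1) = rest.drop (countPrefix x rest) := by
          simp
        rw [hdrop]
        have hcond : (count + ((countPrefix x rest + 1 : Nat) : Int)) = count + 1 + (countPrefix x rest : Int) := by
          push_cast; ring
        rw [hcond]
      · have hcp : countPrefix prev (x :: rest) = 0 := by
          simp [countPrefix, hx]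
        have hA : auxList prev count (x :: rest)
            = if count = prev then prev else auxList x 1 rest := by
          simp [auxList, hx]
        rw [hA, hcp]
        simp only [Nat.cast_zero, add_zero, List.drop_zero]
        by_cases hc : count = prev
        · simp [hc]
        · rw [if_neg hc, if_neg hc, ih]
          conv_rhs => rw [runScan]
          have h3 : ((1 + countPrefix x rest : Nat) : Int) = 1 + (countPrefix x rest : Int) := by
            push_cast; ring
          simp only [h3, Nat.add_sub_cancel_left]

lemma auxList_cons_eq_runScan (x : Int) (rest : List Int) :
    auxList x 1 rest = runScan (x :: rest) := by
  rw [auxList_eq_runScan]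
  conv_rhs => rw [runScan]
  have h3 : ((1 + countPrefix x rest : Nat) : Int) = 1 + (countPrefix x rest : Int) := by
    push_cast; ring
  simp only [h3, Nat.add_sub_cancel_left]

lemma auxA_eq_auxList : ∀ (l₂ l₁ : List Int) (prev count : Int),
    findLuckyAuxA (l₁ ++ prev :: l₂) (l₁.length + 1) count = auxList prev count l₂ := by
  intro l₂
  induction l₂ with
  | nil =>
      intro l₁ prev count
      rw [findLuckyAuxA]
      have hlen : (l₁ ++ [prev]).length = l₁.length + 1 := by simp
      rw [dif_neg (by simp)]
      have hget : PySem.List.pyGet? (l₁ ++ [prev]) (-1) = some prev := by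
        rw [PySem.List.pyGet?_neg_one]; exact List.getLast?_concat
      rw [hget]
      simp [auxList]
  | cons x t ih =>
      intro l₁ prev count
      have hsplit : l₁ ++ prev :: x :: t = (l₁ ++ [prev]) ++ x :: t := by simp
      have hlt : l₁.length + 1 < (l₁ ++ prev :: x :: t).length := by simp
      rw [findLuckyAuxA, dif_pos hlt]
      have hgi : (l₁ ++ prev :: x :: t).getD (l₁.length + 1) 0 = x := by
        rw [hsplit]
        rw [List.getD_eq_getElem?_getD, List.getElem?_append_right (by simp)]
        simp
      have hgp : (l₁ ++ prev :: x :: t).getD (l₁.length + 1 - 1) 0 = prev := by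
        simp only [Nat.add_sub_cancel]
        rw [List.getD_eq_getElem?_getD, List.getElem?_append_right (le_refl _)]
        simp
      rw [hgi, hgp]
      have hIH1 : findLuckyAuxA (l₁ ++ prev :: x :: t) (l₁.length + 1 + 1) (count + 1)
          = auxList x (count+1) t := by
        have h := ih (l₁ ++ [prev]) x (count + 1)
        have hlen2 : (l₁ ++ [prev]).length = l₁.length + 1 := by simp
        rw [hlen2, ← hsplit] at h
        exact h
      have hIH2 : findLuckyAuxA (l₁ ++ prev :: x :: t) (l₁.length + 1 + 1) 1
          = auxList x 1 t := by
        have h := ih (l₁ ++ [prev]) x 1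
        have hlen2 : (l₁ ++ [prev]).length = l₁.length + 1 := by simp
        rw [hlen2, ← hsplit] at h
        exact h
      by_cases hx : x = prev
      · rw [if_pos hx, hIH1, auxList, if_pos hx, hx]
      · rw [if_neg hx, auxList, if_neg hx]
        by_cases hc : count = prev
        · simp [hc]
        · rw [if_neg hc, if_neg hc, hIH2]

-- relating B to runScan
def predB (nums : List Int) (i : Nat) : Bool := i == 0 || !(nums.getD i 0 == nums.getD (i-1) 0)

def boundsOf (nums : List Int) : List Nat := (List.range nums.length).filter (predB nums) ++ [nums.length]

lemma alt_unfold (nums : List Int) :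
    findLuckyNumber_alt nums = scanBounds nums ((boundsOf nums).zip (boundsOf nums).tail) := rfl

lemma getD_drop_add (l : List Int) (k j : Nat) :
    (l.drop k).getD j 0 = l.getD (k + j) 0 := by
  simp [List.getD_eq_getElem?_getD, List.getElem?_drop]

lemma scanBounds_shift (nums : List Int) (k : Nat) :
    ∀ q : List (Nat × Nat),
      scanBounds nums (q.map (Prod.map (k + ·) (k + ·))) = scanBounds (nums.drop k) q := by
  intro q
  induction q with
  | nil => rfl
  | cons p t ih =>
      obtain ⟨s, e⟩ := p
      simp only [List.map_cons, Prod.map, scanBounds, getD_drop_add]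
      have harith : ((k + e : Nat) : Int) - ((k + s : Nat) : Int) = (e : Int) - (s : Int) := by
        push_cast; ring
      rw [harith, ih]

lemma countPrefix_le (v : Int) : ∀ l : List Int, countPrefix v l ≤ l.length := by
  intro l
  induction l with
  | nil => simp [countPrefix]
  | cons x t ih =>
      simp only [countPrefix, List.length_cons]
      split_ifs <;> omega

lemma getD_lt_countPrefix (v : Int) : ∀ (l : List Int) (j : Nat), j < countPrefix v l → l.getD j 0 = v := by
  intro l
  induction l with
  | nil => simp [countPrefix]
  | cons x t ih =>
      intro j hj
      simp only [countPrefix] at hj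
      by_cases hx : x = v
      · rw [if_pos hx] at hj
        match j with
        | 0 => simpa using hx
        | j+1 => simpa using ih j (by omega)
      · rw [if_neg hx] at hj; omega

lemma getD_countPrefix_ne (v : Int) : ∀ l : List Int, countPrefix v l < l.length → l.getD (countPrefix v l) 0 ≠ v := by
  intro l
  induction l with
  | nil => simp [countPrefix]
  | cons x t ih =>
      intro hlt
      simp only [countPrefix] at hlt ⊢
      by_cases hx : x = v
      · rw [if_pos hx] at hlt ⊢
        simpa using ih (by simpa using hlt)
      · rw [if_neg hx]
        simpa using hx

lemma filter_range_run (P : Nat → Bool) (k : Nat) (h0 : P 0 = true)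
    (hf : ∀ i, 1 ≤ i → i < k → P i = false) :
    ∀ m, 1 ≤ m → m ≤ k → (List.range m).filter P = [0] := by
  intro m
  induction m with
  | zero => omega
  | succ m ih =>
      intro _ hm
      rw [List.range_succ, List.filter_append]
      match m, ih with
      | 0, _ => simp [h0]
      | m+1, ih =>
          rw [ih (by omega) (by omega)]
          simp [hf (m+1) (by omega) (by omega)]

lemma alt_eq_runScan_bounded (N : Nat) :
    ∀ nums : List Int, nums.length ≤ N → findLuckyNumber_alt nums = runScan nums := by
  induction N with
  | zero =>
      intro nums h
      have : nums = [] := List.eq_nil_of_length_eq_zero (by omega)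
      subst this; rw [runScan]; rfl
  | succ N ih =>
      intro nums hlen
      match nums with
      | [] => rw [runScan]; rfl
      | x :: rest =>
          -- abbreviations
          set c := countPrefix x rest with hc
          have hcle : c ≤ rest.length := countPrefix_le x rest
          have hk1 : (1 + c) - 1 = c := by omega
          -- values inside the first run
          have hrun : ∀ i : Nat, i ≤ c → (x :: rest).getD i 0 = x := by
            intro i hi
            match i with
            | 0 => rfl
            | i+1 => simpa using getD_lt_countPrefix x rest i (by omega)
          have hP0 : predB (x :: rest) 0 = true := rfl
          have hPfalse : ∀ i, 1 ≤ i → i < 1 + c → predB (x :: rest) i = false := by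
            intro i h1 h2
            have hgi : (x :: rest).getD i 0 = x := hrun i (by omega)
            have hgi1 : (x :: rest).getD (i-1) 0 = x := hrun (i-1) (by omega)
            unfold predB
            rw [hgi, hgi1]
            simp [Nat.pos_iff_ne_zero.mp h1]
          have hn : (x :: rest).length = rest.length + 1 := rfl
          -- unfold B
          rw [alt_unfold]
          unfold boundsOf
          rw [hn]
          by_cases hkn : 1 + c = rest.length + 1
          · -- single run covers the whole list
            have hfilter : (List.range (rest.length + 1)).filter (predB (x :: rest)) = [0] :=
              filter_range_run _ (1 + c) hP0 hPfalse (rest.length + 1) (by omega) (by omega)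
            rw [hfilter]
            have hdropall : rest.drop ((1 + c) - 1) = [] := by
              rw [hk1]; exact List.drop_of_length_le (by omega)
            rw [runScan]
            simp only [List.cons_append, List.nil_append, List.tail_cons, List.zip_cons_cons,
              List.zip_nil_right, scanBounds]
            have hx0 : (x :: rest).getD 0 0 = x := rfl
            rw [hx0, hdropall]
            have : ((rest.length + 1 : Nat) : Int) - ((0 : Nat) : Int) = ((1 + c : Nat) : Int) := by
              push_cast; omega
            rw [this]
            split_ifs <;> simp [runScan]
          · -- k < n : split off the first run, shift, and recurse
            have hklt : 1 + c < rest.length + 1 := by omega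
            set k := 1 + c with hkdef
            set l' : List Int := (x :: rest).drop k with hl'
            have hl'len : l'.length = (rest.length + 1) - k := by
              rw [hl']; simp [hn]
            have hl'pos : 1 ≤ l'.length := by omega
            -- boundary at k is a run start
            have hPk : predB (x :: rest) k = true := by
              have hgk1 : (x :: rest).getD (k-1) 0 = x := hrun (k-1) (by omega)
              have hgk : (x :: rest).getD k 0 ≠ x := by
                have : (x :: rest).getD k 0 = rest.getD c 0 := by
                  simp [hkdef, Nat.add_comm 1 c]
                rw [this]
                exact getD_countPrefix_ne x rest (by omega)
              unfold predB
              rw [hgk1]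
              simp only [Bool.or_eq_true, beq_iff_eq, Bool.not_eq_eq_eq_not, Bool.not_true,
                beq_eq_false_iff_ne, ne_eq]
              exact Or.inr hgk
            -- shifted predicate agrees with the suffix predicate
            have hPshift : ∀ j ∈ List.range ((rest.length + 1) - k),
                predB (x :: rest) (k + j) = predB l' j := by
              intro j _
              match j with
              | 0 => rw [Nat.add_zero, hPk]; rfl
              | j+1 =>
                  have h1 : l'.getD (j+1) 0 = (x :: rest).getD (k + (j+1)) 0 := by
                    rw [hl', getD_drop_add]
                  have h2 : l'.getD j 0 = (x :: rest).getD (k + j) 0 := by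
                    rw [hl', getD_drop_add]
                  have h3 : k + (j + 1) - 1 = k + j := by omega
                  unfold predB
                  have h4 : j + 1 - 1 = j := rfl
                  rw [h4, h1, h2, h3]
                  simp
            -- decompose the filtered range
            have hsplitr : List.range (rest.length + 1)
                = List.range k ++ (List.range ((rest.length + 1) - k)).map (k + ·) := by
              conv_lhs => rw [show rest.length + 1 = k + ((rest.length + 1) - k) by omega]
              exact List.range_add
            have hleft : (List.range k).filter (predB (x :: rest)) = [0] :=
              filter_range_run _ k hP0 hPfalse k (by omega) (le_refl _)
            have hright : ((List.range ((rest.length + 1) - k)).map (k + ·)).filter (predB (x :: rest))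
                = ((List.range ((rest.length + 1) - k)).filter (predB l')).map (k + ·) := by
              rw [List.filter_map]
              congr 1
              exact List.filter_congr hPshift
            set S' : List Nat := (List.range ((rest.length + 1) - k)).filter (predB l') with hS'
            have hstarts : (List.range (rest.length + 1)).filter (predB (x :: rest))
                = 0 :: S'.map (k + ·) := by
              rw [hsplitr, List.filter_append, hleft, hright]; rfl
            -- S' starts with 0
            obtain ⟨S₂, hS₂⟩ : ∃ S₂, S' = 0 :: S₂ := by
              rw [hS']
              obtain ⟨m, hm⟩ : ∃ m, (rest.length + 1) - k = m + 1 := ⟨(rest.length + 1) - k - 1, by omega⟩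
              rw [hm, List.range_succ_eq_map]
              refine ⟨(List.map Nat.succ (List.range m)).filter (predB l'), ?_⟩
              rw [List.filter_cons]
              simp [predB]
            -- bounds as a shifted copy of the suffix bounds
            have hbounds' : S'.map (k + ·) ++ [rest.length + 1]
                = (S' ++ [(rest.length + 1) - k]).map (k + ·) := by
              rw [List.map_append]
              simp only [List.map_cons, List.map_nil]
              congr 2
              omega
            rw [hstarts]
            have hBhead : S'.map (k + ·) ++ [rest.length + 1]
                = k :: (S₂.map (k + ·) ++ [rest.length + 1]) := by
              rw [hS₂]; simp
            -- peel the first boundary pair (0, k)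
            rw [List.cons_append, List.tail_cons, hBhead, List.zip_cons_cons, scanBounds]
            have hx0 : (x :: rest).getD 0 0 = x := rfl
            have harith0 : ((k : Nat) : Int) - ((0 : Nat) : Int) = (k : Int) := by push_cast; ring
            rw [hx0, harith0]
            -- the remaining pairs are exactly the suffix's pairs, shifted by k
            have htailzip : (k :: (S₂.map (k + ·) ++ [rest.length + 1])).zip (S₂.map (k + ·) ++ [rest.length + 1])
                = ((S' ++ [(rest.length + 1) - k]).zip (S' ++ [(rest.length + 1) - k]).tail).map
                    (Prod.map (k + ·) (k + ·)) := by
              have hBeq : k :: (S₂.map (k + ·) ++ [rest.length + 1])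
                  = (S' ++ [(rest.length + 1) - k]).map (k + ·) := by
                rw [← hBhead, hbounds']
              have hTeq : S₂.map (k + ·) ++ [rest.length + 1]
                  = ((S' ++ [(rest.length + 1) - k]).map (k + ·)).tail := by
                rw [← hBeq]; rfl
              rw [hBeq, hTeq, ← List.map_tail, List.zip_map]
            rw [htailzip, scanBounds_shift, ← hl']
            -- recognize B on the suffix and apply the induction hypothesis
            have hback : scanBounds l' ((S' ++ [(rest.length + 1) - k]).zip (S' ++ [(rest.length + 1) - k]).tail)
                = findLuckyNumber_alt l' := by
              rw [alt_unfold]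
              unfold boundsOf
              rw [hl'len, hS']
            rw [hback, ih l' (by omega)]
            -- fold A-side runScan
            have hdrop : rest.drop (k - 1) = l' := by
              rw [hl', hkdef, hk1]
              simp [Nat.add_comm 1 c]
            conv_rhs => rw [runScan]
            exact ite_congr rfl (congrFun rfl) fun a => congrArg runScan (id (Eq.symm hdrop))

lemma alt_eq_runScan (nums : List Int) : findLuckyNumber_alt nums = runScan nums :=
  alt_eq_runScan_bounded nums.length nums (le_refl _)

-- ===== VERDICT (by name: the statement is the Claim_ definition above) =====
theorem findLuckyNumber_spec : Claim_equal_findLuckyNumber := by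
  unfold Claim_equal_findLuckyNumber
  intro nums _ hpre
  unfold Spec_findLuckyNumber
  match nums with
  | [] => exact absurd rfl hpre
  | x :: rest =>
      show findLuckyNumber (x :: rest) = _
      unfold findLuckyNumber
      have := auxA_eq_auxList rest [] x 1
      simp only [List.nil_append, List.length_nil, Nat.zero_add] at this
      rw [this, auxList_cons_eq_runScan, alt_eq_runScan]
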